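-- pv_equiv track=rewrite | github.com/MohTahsin/sample-bedrock-migration-and-modernization-tools-usecases | agent-eval/agent_eval/adapters/generic_json/adapter.py | _diagnose_stitched_trace
-- ===== SOURCE A (Python) =====
-- from typing import Dict, Any, List, Optional, Tuple, Union
--
-- def _diagnose_stitched_trace(events: List[Dict[str, Any]], config: Dict[str, Any]) -> bool:
--     """
--     Diagnose if trace is stitched (multiple conversations improperly combined).
--
--     Checks:
--     - distinct_user_prompts_per_request_id_max: Max distinct prompts per request_id
--     - request_ids_per_user_prompt_max: Max request_ids per user prompt
--     - sample_window_events: Number of events to sample for diagnosis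
--
--     Args:
--         events: Normalized events
--         config: Request ID diagnosis configuration
--
--     Returns:
--         True if trace appears to be stitched
--     """
--     sample_window = config.get("sample_window_events", 5000)
--     max_prompts_per_request = config.get("distinct_user_prompts_per_request_id_max", 1)
--     max_requests_per_prompt = config.get("request_ids_per_user_prompt_max", 3)
--
--     # Sample events if too many
--     sampled_events = events[:sample_window] if len(events) > sample_window else events
--
--     # Extract USER_INPUT events with request_id
--     user_inputs = [
--         e for e in sampled_events
--         if e.get("kind") == "USER_INPUT" and e.get("request_id")
--     ]
--
--     if not user_inputs:
--         return False
--
--     # Count distinct user prompts per request_id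
--     prompts_per_request: Dict[str, set] = {}
--     requests_per_prompt: Dict[str, set] = {}
--
--     for event in user_inputs:
--         request_id = str(event.get("request_id"))
--         # For USER_INPUT, only use text field (not tool_name)
--         prompt = event.get("text", "")
--
--         # Skip empty prompts
--         if not prompt:
--             continue
--
--         if request_id not in prompts_per_request:
--             prompts_per_request[request_id] = set()
--         prompts_per_request[request_id].add(prompt)
--
--         if prompt not in requests_per_prompt:
--             requests_per_prompt[prompt] = set()
--         requests_per_prompt[prompt].add(request_id)
--
--     # Check if any request_id has too many distinct prompts
--     for request_id, prompts in prompts_per_request.items():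
--         if len(prompts) > max_prompts_per_request:
--             return True
--
--     # Check if any prompt has too many request_ids
--     for prompt, requests in requests_per_prompt.items():
--         if len(requests) > max_requests_per_prompt:
--             return True
--
--     return False
-- ===== SOURCE B (Python) =====
-- from typing import Dict, Any, List
--
--
-- def _diagnose_stitched_trace(events: List[Dict[str, Any]], config: Dict[str, Any]) -> bool:
--     sample_window = config.get("sample_window_events", 5000)
--     max_prompts_per_request = config.get("distinct_user_prompts_per_request_id_max", 1)
--     max_requests_per_prompt = config.get("request_ids_per_user_prompt_max", 3)
--
--     sampled = events[:sample_window] if len(events) > sample_window else events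
--
--     # Deduplicated list of (request_id, prompt) pairs, first-seen order.
--     pairs = []
--     for e in sampled:
--         if e.get("kind") == "USER_INPUT" and e.get("request_id") and e.get("text", ""):
--             pr = (str(e.get("request_id")), e.get("text", ""))
--             if pr not in pairs:
--                 pairs.append(pr)
--
--     # No grouping structure at all: for each distinct pair, recount by a direct
--     # scan.  Because the pairs are distinct, the number of pairs sharing a
--     # request_id is the number of distinct prompts for it, and vice versa.
--     for rid, prompt in pairs:
--         if sum(1 for r, _ in pairs if r == rid) > max_prompts_per_request:
--             return True
--         if sum(1 for _, p in pairs if p == prompt) > max_requests_per_prompt: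
--             return True
--     return False
-- ===== Notes on version B (the rewrite author's own statement) =====
-- stated objective: alternative
-- what changed: A groups events into two dicts of sets and scans each dict for an oversized set; B keeps no grouping structure at all: it deduplicates the (request_id, prompt) pairs into one list and, in a single loop with early return, recounts each pair's request_id and prompt by direct nested scans over that list.
import Mathlib
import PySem

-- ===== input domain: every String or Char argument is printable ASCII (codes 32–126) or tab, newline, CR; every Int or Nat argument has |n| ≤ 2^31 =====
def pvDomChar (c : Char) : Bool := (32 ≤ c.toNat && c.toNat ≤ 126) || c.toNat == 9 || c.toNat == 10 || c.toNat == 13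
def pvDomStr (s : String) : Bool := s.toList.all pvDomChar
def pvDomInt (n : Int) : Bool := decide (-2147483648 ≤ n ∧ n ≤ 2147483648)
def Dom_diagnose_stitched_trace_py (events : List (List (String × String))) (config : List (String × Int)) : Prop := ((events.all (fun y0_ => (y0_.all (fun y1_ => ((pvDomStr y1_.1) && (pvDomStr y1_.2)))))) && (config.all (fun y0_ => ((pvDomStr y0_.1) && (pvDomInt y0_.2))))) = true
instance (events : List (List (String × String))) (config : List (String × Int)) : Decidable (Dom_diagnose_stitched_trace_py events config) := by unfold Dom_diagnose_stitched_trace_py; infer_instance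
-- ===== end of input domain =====

-- B replaces A's two dicts-of-sets by a deduplicated list of (request_id, prompt) pairs recounted by
-- direct nested scans in one early-return loop (objective: alternative). Return value only; no mutation.

-- ===== PORT A =====
-- port of Python str() applied to an Optional[str] (str(None) = "None"; exact for the values reaching it)
def pvStr (o : Option String) : String := match o with | none => "None" | some s => s

def diagnose_stitched_trace_py (events : List (List (String × String))) (config : List (String × Int)) : Bool :=
  let cfg := PySem.Dict.mk config
  let sample_window := cfg.getD "sample_window_events" 5000
  let max_prompts_per_request := cfg.getD "distinct_user_prompts_per_request_id_max" 1
  let max_requests_per_prompt := cfg.getD "request_ids_per_user_prompt_max" 3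
  let sampled := if (events.length : Int) > sample_window then PySem.List.slice events none (some sample_window) else events
  let user_inputs := sampled.filter (fun e =>
    ((PySem.Dict.mk e).get? "kind" == some "USER_INPUT") &&
    ((PySem.Dict.mk e).getD "request_id" "" != ""))
  if user_inputs.isEmpty then false else
  let st := user_inputs.foldl
    (fun (st : PySem.Dict String (PySem.Set String) × PySem.Dict String (PySem.Set String)) event =>
      let request_id := pvStr ((PySem.Dict.mk event).get? "request_id")
      let prompt := (PySem.Dict.mk event).getD "text" ""
      if prompt = "" then st else
      let ppr := if st.1.contains request_id then st.1 else st.1.insert request_id PySem.Set.empty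
      let ppr := ppr.modify request_id PySem.Set.empty (fun s => PySem.Set.add s prompt)
      let rpp := if st.2.contains prompt then st.2 else st.2.insert prompt PySem.Set.empty
      let rpp := rpp.modify prompt PySem.Set.empty (fun s => PySem.Set.add s request_id)
      (ppr, rpp))
    (PySem.Dict.empty, PySem.Dict.empty)
  if st.1.items.any (fun rp => PySem.Set.len rp.2 > max_prompts_per_request) then true
  else if st.2.items.any (fun pr => PySem.Set.len pr.2 > max_requests_per_prompt) then true
  else false

-- ===== PORT B =====
def diagnose_stitched_trace_py_alt (events : List (List (String × String))) (config : List (String × Int)) : Bool :=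
  let cfg := PySem.Dict.mk config
  let sample_window := cfg.getD "sample_window_events" 5000
  let max_prompts_per_request := cfg.getD "distinct_user_prompts_per_request_id_max" 1
  let max_requests_per_prompt := cfg.getD "request_ids_per_user_prompt_max" 3
  let sampled := if (events.length : Int) > sample_window then PySem.List.slice events none (some sample_window) else events
  -- "if pr not in pairs: pairs.append(pr)" is exactly PySem.Set.add on the pair list
  let pairs : PySem.Set (String × String) := sampled.foldl (fun s e =>
      if ((PySem.Dict.mk e).get? "kind" == some "USER_INPUT") &&
         ((PySem.Dict.mk e).getD "request_id" "" != "") &&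
         ((PySem.Dict.mk e).getD "text" "" != "")
      then PySem.Set.add s (pvStr ((PySem.Dict.mk e).get? "request_id"), (PySem.Dict.mk e).getD "text" "")
      else s) PySem.Set.empty
  -- the early-return loop: for each pair, recount by a direct scan (sum of 1s = filter length)
  pairs.any (fun x =>
    (((pairs.filter (fun q => q.1 == x.1)).length : Int) > max_prompts_per_request) ||
    (((pairs.filter (fun q => q.2 == x.2)).length : Int) > max_requests_per_prompt))

-- ===== PRECONDITION & SPEC =====
def Spec_diagnose_stitched_trace_py (events : List (List (String × String))) (config : List (String × Int)) (out : Bool) : Prop := out = diagnose_stitched_trace_py_alt events config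
instance (events : List (List (String × String))) (config : List (String × Int)) (out : Bool) : Decidable (Spec_diagnose_stitched_trace_py events config out) := by unfold Spec_diagnose_stitched_trace_py; infer_instance

-- ===== CLAIM (what is proved, stated in full; the proofs are below) =====
def Claim_equal_diagnose_stitched_trace_py : Prop := ∀ (events : List (List (String × String))) (config : List (String × Int)), Dom_diagnose_stitched_trace_py events config → Spec_diagnose_stitched_trace_py events config (diagnose_stitched_trace_py events config)

-- ===== LEMMAS AND PROOFS =====

-- the event filter both ports apply (A as its list-comprehension filter, B inside its loop guard)
def pvKeep (e : List (String × String)) : Bool :=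
  ((PySem.Dict.mk e).get? "kind" == some "USER_INPUT") &&
  ((PySem.Dict.mk e).getD "request_id" "" != "")

-- (request_id, prompt) read off an event
def pvRP (e : List (String × String)) : String × String :=
  (pvStr ((PySem.Dict.mk e).get? "request_id"), (PySem.Dict.mk e).getD "text" "")

def pvG (e : List (String × String)) : Option (String × String) :=
  if (pvRP e).2 = "" then none else some (pvRP e)

-- the list of (request_id, prompt) pairs both ports effectively process, in order
def pvPairs (sampled : List (List (String × String))) : List (String × String) :=
  (sampled.filter pvKeep).filterMap pvG

-- A's per-event dict update: ensure the key is present, then add to its set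
def pvIns (d : PySem.Dict String (PySem.Set String)) (k v : String) : PySem.Dict String (PySem.Set String) :=
  (if d.contains k then d else d.insert k PySem.Set.empty).modify k PySem.Set.empty (fun s => PySem.Set.add s v)

def pvGrp (L : List (String × String)) : PySem.Dict String (PySem.Set String) :=
  L.foldl (fun d x => pvIns d x.1 x.2) PySem.Dict.empty

-- canonical quantity: "some first component with more than k distinct partners"
def pvHitFst (L : List (String × String)) (k : Int) : Bool :=
  (L.map (·.1)).any (fun r => k < ((PySem.Set.ofList ((L.filter (fun x => x.1 == r)).map (·.2))).length : Int))
def pvHitSnd (L : List (String × String)) (k : Int) : Bool :=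
  (L.map (·.2)).any (fun p => k < ((PySem.Set.ofList ((L.filter (fun x => x.2 == p)).map (·.1))).length : Int))

theorem pvFilt_eq : (fun e : List (String × String) =>
    ((PySem.Dict.mk e).get? "kind" == some "USER_INPUT") &&
    ((PySem.Dict.mk e).getD "request_id" "" != "")) = pvKeep := rfl

theorem pvIns_keys (d : PySem.Dict String (PySem.Set String)) (k v : String) :
    (pvIns d k v).keys = if d.contains k then d.keys else d.keys ++ [k] := by
  unfold pvIns
  by_cases h : d.contains k = true
  · rw [if_pos h, if_pos h, PySem.Dict.keys_modify, PySem.Dict.keys_insert_of_contains _ _ h]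
  · rw [if_neg h, if_neg h, PySem.Dict.keys_modify,
      PySem.Dict.keys_insert_of_contains _ _ (PySem.Dict.contains_insert_self d k PySem.Set.empty),
      PySem.Dict.keys_insert_of_not_contains _ _ (by simpa using h)]

theorem pvIns_getD (d : PySem.Dict String (PySem.Set String)) (k v r : String) :
    (pvIns d k v).getD r PySem.Set.empty =
      if r = k then PySem.Set.add (d.getD k PySem.Set.empty) v else d.getD r PySem.Set.empty := by
  unfold pvIns
  by_cases h : d.contains k = true
  · rw [if_pos h, PySem.Dict.getD_modify]
  · rw [if_neg h, PySem.Dict.getD_modify]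
    by_cases hr : r = k
    · rw [if_pos hr, if_pos hr, PySem.Dict.getD_insert, if_pos rfl,
        PySem.Dict.getD_of_not_contains _ _ (by simpa using h)]
    · rw [if_neg hr, if_neg hr, PySem.Dict.getD_insert, if_neg hr]

theorem pvGrp_append (L : List (String × String)) (x : String × String) :
    pvGrp (L ++ [x]) = pvIns (pvGrp L) x.1 x.2 := by
  simp [pvGrp, List.foldl_append]

theorem pvGrp_keys_nodup (L : List (String × String)) : (pvGrp L).keys.Nodup := by
  induction L using List.reverseRecOn with
  | nil => simp [pvGrp, PySem.Dict.keys_empty]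
  | append_singleton L x ih =>
    rw [pvGrp_append, pvIns_keys]
    by_cases h : (pvGrp L).contains x.1 = true
    · rwa [if_pos h]
    · rw [if_neg h]
      have hx : x.1 ∉ (pvGrp L).keys := fun hm =>
        h ((PySem.Dict.contains_iff_mem_keys _ _).2 hm)
      rw [List.nodup_append]
      refine ⟨ih, List.nodup_singleton _, ?_⟩
      intro a ha b hb hab
      rw [List.mem_singleton] at hb
      subst hb
      exact hx (hab ▸ ha)

theorem pvGrp_mem_keys (L : List (String × String)) (r : String) :
    r ∈ (pvGrp L).keys ↔ r ∈ L.map (·.1) := by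
  induction L using List.reverseRecOn with
  | nil => simp [pvGrp, PySem.Dict.keys_empty]
  | append_singleton L x ih =>
    rw [pvGrp_append, pvIns_keys]
    by_cases h : (pvGrp L).contains x.1 = true
    · rw [if_pos h]
      simp only [List.map_append, List.map_cons, List.map_nil, List.mem_append,
        List.mem_singleton]
      constructor
      · intro hr; exact Or.inl (ih.1 hr)
      · rintro (hr | rfl)
        · exact ih.2 hr
        · exact (PySem.Dict.contains_iff_mem_keys _ _).1 h
    · rw [if_neg h]
      simp [ih]

theorem pvGrp_getD (L : List (String × String)) (r : String) :
    (pvGrp L).getD r PySem.Set.empty = PySem.Set.ofList ((L.filter (fun x => x.1 == r)).map (·.2)) := by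
  induction L using List.reverseRecOn with
  | nil => simp [pvGrp, PySem.Set.ofList_nil, PySem.Dict.getD_empty]
  | append_singleton L x ih =>
    rw [pvGrp_append, pvIns_getD, List.filter_append, List.map_append]
    by_cases hr : r = x.1
    · rw [if_pos hr]
      have hf : (List.filter (fun x_1 => x_1.1 == r) [x]) = [x] := by
        simp [hr]
      rw [hf, List.map_cons, List.map_nil, PySem.Set.ofList_append_singleton, ← hr, ih]
    · rw [if_neg hr]
      have hb : (x.1 == r) = false := by
        simp only [beq_eq_false_iff_ne, ne_eq]
        exact fun q => hr q.symm
      have hf : (List.filter (fun x_1 => x_1.1 == r) [x]) = [] := by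
        simp [hb]
      rw [hf, List.map_nil, List.append_nil, ih]

-- A's grouped dict triggers iff the canonical quantity exceeds k
theorem pvGrp_any (L : List (String × String)) (k : Int) :
    ((pvGrp L).items.any (fun rp => PySem.Set.len rp.2 > k)) = pvHitFst L k := by
  rw [Bool.eq_iff_iff]
  rw [PySem.Dict.items_eq_map_keys _ (pvGrp_keys_nodup L) PySem.Set.empty, List.any_map]
  unfold pvHitFst
  rw [List.any_eq_true, List.any_eq_true]
  constructor
  · rintro ⟨r, hr, hk⟩
    refine ⟨r, (pvGrp_mem_keys L r).1 hr, ?_⟩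
    simp only [Function.comp_apply, decide_eq_true_eq] at hk
    simpa [PySem.Set.len, decide_eq_true_eq] using (pvGrp_getD L r) ▸ hk
  · rintro ⟨r, hr, hk⟩
    refine ⟨r, (pvGrp_mem_keys L r).2 hr, ?_⟩
    simp only [Function.comp_apply, decide_eq_true_eq]
    simp only [decide_eq_true_eq] at hk
    rw [pvGrp_getD L r]
    simpa [PySem.Set.len] using hk

-- counting dedup pairs by first component = size of the set of partners
theorem pvCount_fst (L : List (String × String)) (r : String) :
    ((((PySem.Set.ofList L).filter (fun q => q.1 == r)).length : Int)) =
      ((PySem.Set.ofList ((L.filter (fun x => x.1 == r)).map (·.2))).length : Int) := by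
  have hnodF : ((PySem.Set.ofList L).filter (fun x => x.1 == r)).Nodup :=
    (PySem.Set.nodup_ofList L).filter _
  have hinj : ((((PySem.Set.ofList L).filter (fun x => x.1 == r)).map (·.2)) : List String).Nodup := by
    refine hnodF.map_on ?_
    intro x hx y hy hxy
    have hx1 : x.1 = r := by simpa using (List.mem_filter.1 hx).2
    have hy1 : y.1 = r := by simpa using (List.mem_filter.1 hy).2
    exact Prod.ext (hx1.trans hy1.symm) hxy
  have hperm : ((((PySem.Set.ofList L).filter (fun x => x.1 == r)).map (·.2)) : List String).Perm
      (PySem.Set.ofList ((L.filter (fun x => x.1 == r)).map (·.2))) := by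
    refine (List.perm_ext_iff_of_nodup hinj (PySem.Set.nodup_ofList _)).2 ?_
    intro y
    simp only [List.mem_map, List.mem_filter, PySem.Set.mem_ofList, beq_iff_eq]
  have hlen := hperm.length_eq
  rw [List.length_map] at hlen
  exact_mod_cast congrArg Nat.cast hlen

theorem pvCount_snd (L : List (String × String)) (p : String) :
    ((((PySem.Set.ofList L).filter (fun q => q.2 == p)).length : Int)) =
      ((PySem.Set.ofList ((L.filter (fun x => x.2 == p)).map (·.1))).length : Int) := by
  have hnodF : ((PySem.Set.ofList L).filter (fun x => x.2 == p)).Nodup :=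
    (PySem.Set.nodup_ofList L).filter _
  have hinj : ((((PySem.Set.ofList L).filter (fun x => x.2 == p)).map (·.1)) : List String).Nodup := by
    refine hnodF.map_on ?_
    intro x hx y hy hxy
    have hx2 : x.2 = p := by simpa using (List.mem_filter.1 hx).2
    have hy2 : y.2 = p := by simpa using (List.mem_filter.1 hy).2
    exact Prod.ext hxy (hx2.trans hy2.symm)
  have hperm : ((((PySem.Set.ofList L).filter (fun x => x.2 == p)).map (·.1)) : List String).Perm
      (PySem.Set.ofList ((L.filter (fun x => x.2 == p)).map (·.1))) := by
    refine (List.perm_ext_iff_of_nodup hinj (PySem.Set.nodup_ofList _)).2 ?_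
    intro y
    simp only [List.mem_map, List.mem_filter, PySem.Set.mem_ofList, beq_iff_eq]
  have hlen := hperm.length_eq
  rw [List.length_map] at hlen
  exact_mod_cast congrArg Nat.cast hlen

theorem pvSwap_pairs (L : List (String × String)) (k : Int) :
    pvHitFst (L.map Prod.swap) k = pvHitSnd L k := by
  unfold pvHitFst pvHitSnd
  rw [List.map_map]
  have h1 : ((fun x : String × String => x.1) ∘ Prod.swap) = (fun x : String × String => x.2) := rfl
  rw [h1]
  congr 1
  funext r
  rw [List.filter_map, List.map_map]
  rfl

-- A's skip-empty loop over the filtered events is the pair-list loop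
theorem pvA_fold (ls : List (List (String × String)))
    (init : PySem.Dict String (PySem.Set String) × PySem.Dict String (PySem.Set String)) :
    (ls.filter pvKeep).foldl
      (fun st event =>
        if (PySem.Dict.mk event).getD "text" "" = "" then st else
        ((if st.1.contains (pvStr ((PySem.Dict.mk event).get? "request_id")) then st.1
          else st.1.insert (pvStr ((PySem.Dict.mk event).get? "request_id")) PySem.Set.empty).modify
            (pvStr ((PySem.Dict.mk event).get? "request_id")) PySem.Set.empty
            (fun s => PySem.Set.add s ((PySem.Dict.mk event).getD "text" "")),
         (if st.2.contains ((PySem.Dict.mk event).getD "text" "") then st.2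
          else st.2.insert ((PySem.Dict.mk event).getD "text" "") PySem.Set.empty).modify
            ((PySem.Dict.mk event).getD "text" "") PySem.Set.empty
            (fun s => PySem.Set.add s (pvStr ((PySem.Dict.mk event).get? "request_id"))))) init
    = (pvPairs ls).foldl (fun st x => (pvIns st.1 x.1 x.2, pvIns st.2 x.2 x.1)) init := by
  unfold pvPairs
  generalize ls.filter pvKeep = us
  induction us generalizing init with
  | nil => rfl
  | cons e us ih =>
    simp only [List.foldl_cons]
    by_cases h : (PySem.Dict.mk e).getD "text" "" = ""
    · rw [List.filterMap_cons_none (by simp [pvG, pvRP, h]), if_pos h]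
      exact ih init
    · rw [List.filterMap_cons_some (show pvG e = some (pvRP e) by simp [pvG, pvRP, h]),
        if_neg h, List.foldl_cons]
      exact ih _

-- B's one-pass guarded dedup build over sampled yields set(pvPairs sampled)
theorem pvB_fold (ls : List (List (String × String))) (s : PySem.Set (String × String)) :
    ls.foldl (fun s e =>
      if ((PySem.Dict.mk e).get? "kind" == some "USER_INPUT") &&
         ((PySem.Dict.mk e).getD "request_id" "" != "") &&
         ((PySem.Dict.mk e).getD "text" "" != "")
      then PySem.Set.add s (pvStr ((PySem.Dict.mk e).get? "request_id"), (PySem.Dict.mk e).getD "text" "")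
      else s) s
    = PySem.Set.update s (pvPairs ls) := by
  rw [show (fun (s : PySem.Set (String × String)) e =>
      if ((PySem.Dict.mk e).get? "kind" == some "USER_INPUT") &&
         ((PySem.Dict.mk e).getD "request_id" "" != "") &&
         ((PySem.Dict.mk e).getD "text" "" != "")
      then PySem.Set.add s (pvStr ((PySem.Dict.mk e).get? "request_id"), (PySem.Dict.mk e).getD "text" "")
      else s)
    = (fun (s : PySem.Set (String × String)) e =>
      if pvKeep e && ((PySem.Dict.mk e).getD "text" "" != "")
      then PySem.Set.add s (pvStr ((PySem.Dict.mk e).get? "request_id"), (PySem.Dict.mk e).getD "text" "")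
      else s) from rfl]
  induction ls generalizing s with
  | nil => simp [pvPairs, PySem.Set.update_nil]
  | cons e ls ih =>
    have hsplit : pvPairs (e :: ls) =
        (if pvKeep e && ((PySem.Dict.mk e).getD "text" "" != "") then [pvRP e] else []) ++ pvPairs ls := by
      unfold pvPairs
      rw [List.filter_cons]
      by_cases hk : pvKeep e = true
      · rw [if_pos hk, hk]
        by_cases ht : (pvRP e).2 = ""
        · rw [List.filterMap_cons_none (by simp [pvG, ht])]
          have hb : ((PySem.Dict.mk e).getD "text" "" != "") = false := by simpa [pvRP] using ht
          rw [hb]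
          rfl
        · rw [List.filterMap_cons_some (show pvG e = some (pvRP e) by simp [pvG, ht])]
          have hb : ((PySem.Dict.mk e).getD "text" "" != "") = true := by simpa [pvRP] using ht
          rw [hb]
          rfl
      · have hk' : pvKeep e = false := by simpa using hk
        rw [if_neg hk, hk']
        rfl
    rw [hsplit]
    simp only [List.foldl_cons]
    by_cases hcond : (pvKeep e && ((PySem.Dict.mk e).getD "text" "" != "")) = true
    · rw [if_pos hcond]
      rw [if_pos hcond]
      rw [List.singleton_append, PySem.Set.update_cons, ih]
      rfl
    · rw [if_neg hcond]
      rw [if_neg hcond]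
      rw [ih]
      rfl

-- bridging: the component folds are pvGrp (A side)
theorem pvGrp_eq (L : List (String × String)) :
    List.foldl (fun d x => pvIns d x.1 x.2) PySem.Dict.empty L = pvGrp L := rfl

theorem pvGrp_swap_eq (L : List (String × String)) :
    List.foldl (fun d x => pvIns d x.2 x.1) PySem.Dict.empty L = pvGrp (L.map Prod.swap) := by
  unfold pvGrp
  rw [List.foldl_map]
  rfl

-- B's brute recount over the dedup list triggers iff the canonical quantities exceed their bounds
theorem pvBrute_fst (L : List (String × String)) (k : Int) :
    ((PySem.Set.ofList L).any (fun x =>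
      k < (((PySem.Set.ofList L).filter (fun q => q.1 == x.1)).length : Int))) = pvHitFst L k := by
  rw [Bool.eq_iff_iff]
  unfold pvHitFst
  simp only [List.any_eq_true, List.mem_map, decide_eq_true_eq]
  constructor
  · rintro ⟨x, hxM, hk⟩
    refine ⟨x.1, ⟨x, (PySem.Set.mem_ofList _ _).1 hxM, rfl⟩, ?_⟩
    rwa [pvCount_fst] at hk
  · rintro ⟨r, ⟨x, hxL, rfl⟩, hk⟩
    refine ⟨x, (PySem.Set.mem_ofList _ _).2 hxL, ?_⟩
    rwa [pvCount_fst]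

theorem pvBrute_snd (L : List (String × String)) (k : Int) :
    ((PySem.Set.ofList L).any (fun x =>
      k < (((PySem.Set.ofList L).filter (fun q => q.2 == x.2)).length : Int))) = pvHitSnd L k := by
  rw [Bool.eq_iff_iff]
  unfold pvHitSnd
  simp only [List.any_eq_true, List.mem_map, decide_eq_true_eq]
  constructor
  · rintro ⟨x, hxM, hk⟩
    refine ⟨x.2, ⟨x, (PySem.Set.mem_ofList _ _).1 hxM, rfl⟩, ?_⟩
    rwa [pvCount_snd] at hk
  · rintro ⟨p, ⟨x, hxL, rfl⟩, hk⟩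
    refine ⟨x, (PySem.Set.mem_ofList _ _).2 hxL, ?_⟩
    rwa [pvCount_snd]

-- any distributes over the per-element disjunction
theorem pvAny_or {α : Type} (l : List α) (p q : α → Bool) :
    l.any (fun x => p x || q x) = (l.any p || l.any q) := by
  induction l with
  | nil => rfl
  | cons a l ih =>
    simp only [List.any_cons, ih]
    cases p a <;> cases q a <;> cases l.any p <;> cases l.any q <;> rfl

-- final shape: A's early-return chain with its empty-guard is the Boolean disjunction
theorem pvFinal (ls : List (List (String × String))) (k1 k2 : Int) :
    (if (ls.filter pvKeep).isEmpty then false else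
      if pvHitFst (pvPairs ls) k1 then true else
      if pvHitSnd (pvPairs ls) k2 then true else false)
    = (pvHitFst (pvPairs ls) k1 || pvHitSnd (pvPairs ls) k2) := by
  by_cases h : (ls.filter pvKeep).isEmpty = true
  · rw [if_pos h]
    have hnil : pvPairs ls = [] := by
      unfold pvPairs
      rw [List.isEmpty_iff.1 h]
      rfl
    rw [hnil]
    rfl
  · rw [if_neg h]
    generalize pvHitFst (pvPairs ls) k1 = a
    generalize pvHitSnd (pvPairs ls) k2 = b
    cases a <;> cases b <;> rfl

-- ===== VERDICT (by name: the statement is the Claim_ definition above) =====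
theorem diagnose_stitched_trace_py_spec : Claim_equal_diagnose_stitched_trace_py := by
  intro events config _
  unfold Spec_diagnose_stitched_trace_py diagnose_stitched_trace_py diagnose_stitched_trace_py_alt
  simp only [pvFilt_eq]
  rw [pvA_fold, pvB_fold, PySem.Set.update_empty]
  rw [PySem.List.foldl_prod_mk
    (fun (d : PySem.Dict String (PySem.Set String)) (x : String × String) => pvIns d x.1 x.2)
    (fun (d : PySem.Dict String (PySem.Set String)) (x : String × String) => pvIns d x.2 x.1)]
  simp only [pvGrp_eq, pvGrp_swap_eq]
  rw [pvGrp_any, pvGrp_any, pvSwap_pairs]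
  simp only [gt_iff_lt]
  rw [pvAny_or, pvBrute_fst, pvBrute_snd]
  exact pvFinal _ _ _
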